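-- pv_equiv track=rewrite | github.com/lucy-madec/runtrack-python | jour04/job14/main.py | my_long_word
-- ===== SOURCE A (Python) =====
-- def my_long_word(n, phrase):
--     mots = ""
--     mot = ""
--     compteur = 0
--
--     for lettre in phrase:
--         if ('a' <= lettre <= 'z' or 'A' <= lettre <= 'Z' or '0' <= lettre <= '9' <= '9' or lettre.isalpha()):
--             mot += lettre
--             compteur += 1
--         elif mot:
--             if compteur > n:
--                 mots += mot + " "
--             mot = ""
--             compteur = 0
--
--     if mot and compteur > n:
--         mots += mot
--
--     return mots
-- ===== SOURCE B (Python) =====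
-- def my_long_word(n, phrase):
--     def is_word(c):
--         return 'a' <= c <= 'z' or 'A' <= c <= 'Z' or '0' <= c <= '9' or c.isalpha()
--
--     out = []
--     i = 0
--     L = len(phrase)
--     while i < L:
--         if not is_word(phrase[i]):
--             i += 1
--             continue
--         j = i
--         while j < L and is_word(phrase[j]):
--             j += 1
--         if j - i > n:
--             out.append(phrase[i:j])
--             if j < L:
--                 out.append(" ")
--         i = j
--     return "".join(out)
-- ===== Notes on version B (the rewrite author's own statement) =====
-- stated objective: alternative
-- what changed: Replaces the char-by-char accumulator loop (building the current word and a counter, flushing on separators and once more after the loop) with an index-based run scanner: skip separator chars, find each maximal word-run by advancing a second index, emit the run (with a space only when the run is not at end of string) via a join of collected pieces.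
import Mathlib
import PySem

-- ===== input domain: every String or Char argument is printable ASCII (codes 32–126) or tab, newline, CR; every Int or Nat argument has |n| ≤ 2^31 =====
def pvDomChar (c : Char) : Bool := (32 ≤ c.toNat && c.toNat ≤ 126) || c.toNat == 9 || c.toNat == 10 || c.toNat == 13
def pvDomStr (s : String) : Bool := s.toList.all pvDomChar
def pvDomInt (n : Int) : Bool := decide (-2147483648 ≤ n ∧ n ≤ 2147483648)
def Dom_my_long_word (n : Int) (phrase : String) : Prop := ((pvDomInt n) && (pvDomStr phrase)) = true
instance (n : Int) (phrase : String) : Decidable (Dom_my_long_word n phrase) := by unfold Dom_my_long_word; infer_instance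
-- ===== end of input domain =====

-- B replaces A's char-by-char accumulator loop by an index-free run scanner (skip separators,
-- take each maximal word-run whole); alternative decomposition, same O(L) cost.

-- ===== PORT A =====
-- A's character test, including the redundant chained '… <= '9' <= '9'' comparison, transliterated.
def pvIsWordA (c : Char) : Bool :=
  (decide ('a' ≤ c) && decide (c ≤ 'z')) || (decide ('A' ≤ c) && decide (c ≤ 'Z')) ||
  (decide ('0' ≤ c) && decide (c ≤ '9') && decide (('9' : Char) ≤ '9')) || PySem.Chars.isalpha c

-- loop state: (mots, mot, compteur); strings handled as List Char, rebuilt at the end.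
def pvStepA (n : Int) (st : List Char × List Char × Int) (c : Char) : List Char × List Char × Int :=
  if pvIsWordA c then (st.1, st.2.1 ++ [c], st.2.2 + 1)
  else if st.2.1 ≠ [] then
    (if st.2.2 > n then st.1 ++ st.2.1 ++ [' '] else st.1, ([] : List Char), (0 : Int))
  else st

def my_long_word (n : Int) (phrase : String) : String :=
  let st := phrase.toList.foldl (pvStepA n) ([], [], 0)
  String.mk (if st.2.1 ≠ [] ∧ st.2.2 > n then st.1 ++ st.2.1 else st.1)

-- ===== PORT B =====
-- B's is_word helper (same class, written without the redundant comparison).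
def pvIsWordB (c : Char) : Bool :=
  (decide ('a' ≤ c) && decide (c ≤ 'z')) || (decide ('A' ≤ c) && decide (c ≤ 'Z')) ||
  (decide ('0' ≤ c) && decide (c ≤ '9')) || PySem.Chars.isalpha c

-- B's while loop over the index i: skip a separator, otherwise take the maximal word-run
-- (the inner while on j = takeWhile / the slice phrase[i:j]) and continue after it.
def pvScanB (n : Int) : List Char → List Char
  | [] => []
  | c :: rest =>
    if !pvIsWordB c then pvScanB n rest
    else
      let run := List.takeWhile pvIsWordB (c :: rest)
      let rest' := List.dropWhile pvIsWordB (c :: rest)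
      (if (run.length : Int) > n then run ++ (if rest' = [] then [] else [' ']) else []) ++
        pvScanB n rest'
termination_by l => l.length
decreasing_by
  · simp
  · simp only [List.dropWhile_cons_of_pos (by simpa using (by simpa using ‹¬ (!pvIsWordB c) = true›))]
    exact Nat.lt_succ_of_le (List.length_dropWhile_le _ _)

def my_long_word_alt (n : Int) (phrase : String) : String :=
  String.mk (pvScanB n phrase.toList)

-- ===== PRECONDITION & SPEC =====
def Spec_my_long_word (n : Int) (phrase : String) (out : String) : Prop := out = my_long_word_alt n phrase
instance (n : Int) (phrase : String) (out : String) : Decidable (Spec_my_long_word n phrase out) := by unfold Spec_my_long_word; infer_instance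

-- ===== CLAIM (what is proved, stated in full; the proofs are below) =====
def Claim_equal_my_long_word : Prop := ∀ (n : Int) (phrase : String), Dom_my_long_word n phrase → Spec_my_long_word n phrase (my_long_word n phrase)

-- ===== LEMMAS AND PROOFS =====

theorem pvIsWord_eq (c : Char) : pvIsWordA c = pvIsWordB c := by
  simp [pvIsWordA, pvIsWordB]

-- processing a run of word characters just appends it to mot and counts it
theorem foldl_run (n : Int) (run : List Char) (h : ∀ c ∈ run, pvIsWordB c = true) :
    ∀ (rest mots mot : List Char) (cnt : Int),
    List.foldl (pvStepA n) (mots, mot, cnt) (run ++ rest) =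
      List.foldl (pvStepA n) (mots, mot ++ run, cnt + run.length) rest := by
  induction run with
  | nil => intro rest mots mot cnt; simp
  | cons c cs ih =>
    intro rest mots mot cnt
    have hc : pvIsWordA c = true := by rw [pvIsWord_eq]; exact h c (by simp)
    simp only [List.cons_append, List.foldl_cons, pvStepA, hc, if_true]
    rw [ih (fun d hd => h d (by simp [hd])) rest mots (mot ++ [c]) (cnt + 1)]
    have h1 : mot ++ [c] ++ cs = mot ++ c :: cs := by simp
    have h2 : cnt + 1 + (cs.length : Int) = cnt + ((c :: cs).length : Int) := by
      push_cast [List.length_cons]; omega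
    rw [h1, h2]

def pvFinish (n : Int) (st : List Char × List Char × Int) : List Char :=
  if st.2.1 ≠ [] ∧ st.2.2 > n then st.1 ++ st.2.1 else st.1

theorem main_lemma (n : Int) : ∀ (l mots : List Char),
    pvFinish n (List.foldl (pvStepA n) (mots, [], 0) l) = mots ++ pvScanB n l := by
  intro l
  induction l using pvScanB.induct with
  | case1 => intro mots; simp [pvFinish, pvScanB]
  | case2 c rest hc ih =>
    intro mots
    have hcB : pvIsWordB c = false := by simpa using hc
    have hcA : pvIsWordA c = false := by rw [pvIsWord_eq]; exact hcB
    simp only [List.foldl_cons, pvStepA, hcA, Bool.false_eq_true, if_false, ne_eq,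
      not_true_eq_false, if_false]
    rw [ih mots, pvScanB]
    simp [hcB]
  | case3 c rest hc rdrop ih0 =>
    intro mots
    have hword : pvIsWordB c = true := by simpa using hc
    have ih : ∀ (mots : List Char),
        pvFinish n (List.foldl (pvStepA n) (mots, [], 0) (List.dropWhile pvIsWordB (c :: rest)))
          = mots ++ pvScanB n (List.dropWhile pvIsWordB (c :: rest)) := ih0
    set run := List.takeWhile pvIsWordB (c :: rest) with hrun
    set rest' := List.dropWhile pvIsWordB (c :: rest) with hrest'
    have hsplit : c :: rest = run ++ rest' := (List.takeWhile_append_dropWhile).symm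
    have hall : ∀ d ∈ run, pvIsWordB d = true := by
      intro d hd; exact List.mem_takeWhile_imp hd
    have hrunne : run ≠ [] := by
      rw [hrun]; simp [hword]
    rw [show List.foldl (pvStepA n) (mots, ([] : List Char), (0 : Int)) (c :: rest)
        = List.foldl (pvStepA n) (mots, run, (run.length : Int)) rest' by
      rw [hsplit, foldl_run n run hall]; simp]
    rw [pvScanB]
    simp only [hword, Bool.not_true, Bool.false_eq_true, if_false, ← hrun, ← hrest']
    cases hre : rest' with
    | nil =>
      simp only [List.foldl_nil, pvFinish]
      by_cases hn : (run.length : Int) > n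
      · simp [hrunne, hn, pvScanB]
      · simp [hrunne, hn, pvScanB]
    | cons d rest2 =>
      have hdc : List.dropWhile pvIsWordB (c :: rest) = d :: rest2 := by
        rw [← hrest']; exact hre
      have hd : pvIsWordB d = false := by
        have h3 := List.head_dropWhile_not pvIsWordB (l := c :: rest) (by rw [hdc]; simp)
        simpa [hdc] using h3
      have hdA : pvIsWordA d = false := by rw [pvIsWord_eq]; exact hd
      have ih2 : ∀ (m : List Char),
          pvFinish n (List.foldl (pvStepA n) (m, [], 0) rest2) = m ++ pvScanB n (d :: rest2) := by
        intro m
        have h5 := ih m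
        rw [hre] at h5
        simpa [pvStepA, hdA] using h5
      simp only [List.foldl_cons, pvStepA, hdA, Bool.false_eq_true, if_false, ne_eq, hrunne,
        not_false_iff, if_pos]
      by_cases hn : (run.length : Int) > n
      · rw [if_pos hn, if_pos hn, ih2 (mots ++ run ++ [' '])]
        simp
      · rw [if_neg hn, if_neg hn, ih2 mots]
        simp

-- ===== VERDICT (by name: the statement is the Claim_ definition above) =====
theorem my_long_word_spec : Claim_equal_my_long_word := by
  intro n phrase _
  unfold Spec_my_long_word my_long_word my_long_word_alt
  have h := main_lemma n phrase.toList []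
  simp only [List.nil_append, pvFinish] at h
  exact congrArg String.mk h
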